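-- pv_equiv track=rewrite | github.com/tanerijun/algo-slaying | apcs/掛號問題.py | count_bracket_pair
-- ===== SOURCE A (Python) =====
-- def count_bracket_pair(s):
-- 	stack = []
-- 	count = 0
-- 	for ch in s:
-- 		if ch == "(":
-- 			stack.append(")")
-- 		if ch == ")":
-- 			if len(stack) == 0:
-- 				return 0
-- 			stack.pop()
-- 			count += 1
--
-- 	if len(stack) > 0:
-- 		return 0
--
-- 	return count
-- ===== SOURCE B (Python) =====
-- def count_bracket_pair(s):
-- 	t = "".join(ch for ch in s if ch in "()")
-- 	while "()" in t:
-- 		t = t.replace("()", "")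
-- 	return s.count("(") if t == "" else 0
-- ===== Notes on version B (the rewrite author's own statement) =====
-- stated objective: alternative
-- what changed: Replaces A's single-pass stack-and-counter scan with a fixpoint reduction: filter the string to its bracket characters, repeatedly delete every adjacent open-close pair with str.replace until none remain, and return the count of opening brackets iff the residue is empty, else 0.
import Mathlib
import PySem

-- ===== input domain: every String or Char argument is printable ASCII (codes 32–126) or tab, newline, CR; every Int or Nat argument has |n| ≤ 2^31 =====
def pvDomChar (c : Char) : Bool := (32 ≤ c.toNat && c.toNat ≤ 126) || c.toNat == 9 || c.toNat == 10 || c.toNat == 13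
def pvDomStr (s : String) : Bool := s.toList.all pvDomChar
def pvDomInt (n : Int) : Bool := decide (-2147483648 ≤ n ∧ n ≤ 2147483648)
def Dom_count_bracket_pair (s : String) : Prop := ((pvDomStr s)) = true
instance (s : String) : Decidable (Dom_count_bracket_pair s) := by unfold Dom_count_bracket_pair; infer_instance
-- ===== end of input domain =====

-- B replaces A's single-pass stack-and-counter scan by a fixpoint reduction (filter to
-- brackets, delete all "()" substrings with str.replace until none remain, then count '(');
-- same return value proved below; objective: alternative algorithm.

-- ===== PORT A =====
-- A's loop over the characters, carrying the stack and the pair counter.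
def cbpGo : List Char → List Char → Int → Int
  | [], stack, count => if stack.length > 0 then 0 else count
  | ch :: rest, stack, count =>
    let stack1 := if ch = '(' then stack ++ [')'] else stack
    if ch = ')' then
      if stack1.length = 0 then 0
      else cbpGo rest stack1.dropLast (count + 1)
    else cbpGo rest stack1 count

def count_bracket_pair (s : String) : Int := cbpGo s.toList [] 0

-- ===== PORT B =====
-- Termination measure for B's while loop: one `t.replace("()", "")` step on a list is
-- `cbpRep` (proved equal to PySem.Chars.replace below), and it strictly shortens the
-- list whenever "()" occurs in it.  These facts are cited by the port's decreasing_by.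
def cbpRep : List Char → List Char
  | [] => []
  | [c] => [c]
  | c1 :: c2 :: t => if c1 = '(' ∧ c2 = ')' then cbpRep t else c1 :: cbpRep (c2 :: t)
  termination_by l => l.length

theorem cbpRep_length_le (l : List Char) : (cbpRep l).length ≤ l.length := by
  fun_induction cbpRep l with
  | case1 => simp
  | case2 c => simp
  | case3 c1 c2 t h ih => simp; omega
  | case4 c1 c2 t h ih => simp at ih ⊢; omega

theorem cbpRep_length_lt (l : List Char) (h : ['(', ')'] <:+: l) :
    (cbpRep l).length < l.length := by
  fun_induction cbpRep l with
  | case1 => simp at h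
  | case2 c =>
    exfalso
    rcases h with ⟨u, v, huv⟩
    have := congrArg List.length huv; simp at this; omega
  | case3 c1 c2 t hp ih =>
    have := cbpRep_length_le t
    simp; omega
  | case4 c1 c2 t hp ih =>
    have h' : ['(', ')'] <:+: c2 :: t := by
      rcases (List.infix_cons_iff.mp h) with hpre | htail
      · rcases hpre with ⟨w, hw⟩
        injection hw with h1 hw'
        injection hw' with h2 _
        exact absurd ⟨h1.symm ▸ rfl, by rw [← h2]⟩ hp
      · exact htail
    have := ih h'
    simp at this ⊢; omega

theorem cbpReplace_go_eq (fuel : Nat) (l acc : List Char) (hf : l.length ≤ fuel) :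
    PySem.Chars.replace.go ['(', ')'] [] fuel l acc = acc.reverse ++ cbpRep l := by
  induction fuel generalizing l acc with
  | zero =>
    have : l = [] := by cases l <;> simp_all
    subst this; simp [PySem.Chars.replace.go, cbpRep]
  | succ f ih =>
    match l with
    | [] => simp [PySem.Chars.replace.go, cbpRep]
    | [c] =>
      have hnp : List.isPrefixOf ['(', ')'] [c] = false := by
        simp [List.isPrefixOf]
      rw [show PySem.Chars.replace.go ['(', ')'] [] (f+1) [c] acc
            = PySem.Chars.replace.go ['(', ')'] [] f [] (c :: acc) by
          simp [PySem.Chars.replace.go, hnp]]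
      rw [ih [] (c :: acc) (by simp)]
      simp [cbpRep]
    | c1 :: c2 :: t =>
      by_cases hp : c1 = '(' ∧ c2 = ')'
      · obtain ⟨h1, h2⟩ := hp; subst h1; subst h2
        rw [show PySem.Chars.replace.go ['(', ')'] [] (f+1) ('(' :: ')' :: t) acc
              = PySem.Chars.replace.go ['(', ')'] [] f t acc by
            simp [PySem.Chars.replace.go, List.isPrefixOf]]
        rw [ih t acc (by simp at hf; omega)]
        simp [cbpRep]
      · have hnp : List.isPrefixOf ['(', ')'] (c1 :: c2 :: t) = false := by
          simp [List.isPrefixOf]; intro h1 h2; exact hp ⟨h1.symm ▸ rfl, by rw [← h2]⟩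
        rw [show PySem.Chars.replace.go ['(', ')'] [] (f+1) (c1 :: c2 :: t) acc
              = PySem.Chars.replace.go ['(', ')'] [] f (c2 :: t) (c1 :: acc) by
            simp [PySem.Chars.replace.go, hnp]]
        rw [ih (c2 :: t) (c1 :: acc) (by simp at hf ⊢; omega)]
        simp only [cbpRep, if_neg hp]
        simp

theorem cbpReplace_eq (l : List Char) :
    PySem.Chars.replace l ['(', ')'] [] = cbpRep l := by
  rw [PySem.Chars.replace, if_neg (by simp)]
  exact (cbpReplace_go_eq l.length l [] le_rfl).trans (by simp)

-- B's while loop: t = t.replace("()", "") while "()" in t.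
def cbpFix (t : List Char) : List Char :=
  if h : PySem.Chars.isIn ['(', ')'] t then
    cbpFix (PySem.Chars.replace t ['(', ')'] [])
  else t
  termination_by t.length
  decreasing_by
    rw [cbpReplace_eq]
    exact cbpRep_length_lt t ((PySem.Chars.isIn_iff_infix _ _).mp h)

-- `ch in "()"` on a single character is membership among '(' and ')'.
def count_bracket_pair_alt (s : String) : Int :=
  let t := s.toList.filter (fun ch => ch == '(' || ch == ')')
  let t0 := cbpFix t
  if t0.isEmpty then (PySem.Str.count s "(" : Int) else 0

-- ===== PRECONDITION & SPEC =====
def Spec_count_bracket_pair (s : String) (out : Int) : Prop := out = count_bracket_pair_alt s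
instance (s : String) (out : Int) : Decidable (Spec_count_bracket_pair s out) := by unfold Spec_count_bracket_pair; infer_instance

-- ===== CLAIM (what is proved, stated in full; the proofs are below) =====
def Claim_equal_count_bracket_pair : Prop := ∀ (s : String), Dom_count_bracket_pair s → Spec_count_bracket_pair s (count_bracket_pair s)

-- ===== LEMMAS AND PROOFS =====

-- Proof-side characterisation of well-nestedness: Python-style balance validator
-- (none = "would return 0 early"; some b = falls through with balance b).
def cbpCheck : List Char → Int → Option Int
  | [], bal => some bal
  | ch :: rest, bal =>
    if ch = '(' then cbpCheck rest (bal + 1)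
    else if ch = ')' then
      (if bal = 0 then none else cbpCheck rest (bal - 1))
    else cbpCheck rest bal

-- A's stack is always a pile of ')' characters, so it is a replicate; relate A's loop to the validator.
theorem cbpGo_replicate (cs : List Char) : ∀ (n : Nat) (count : Int),
    cbpGo cs (List.replicate n ')') count =
      (match cbpCheck cs (n : Int) with
       | none => 0
       | some bal => if bal = 0 then count + (cs.count ')' : Int) else 0) := by
  induction cs with
  | nil =>
    intro n count
    cases n with
    | zero => simp [cbpGo, cbpCheck]
    | succ m => simp [cbpGo, cbpCheck]; omega
  | cons ch rest ih =>
    intro n count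
    by_cases hop : ch = '('
    · subst hop
      rw [show cbpGo ('('::rest) (List.replicate n ')') count
            = cbpGo rest (List.replicate (n+1) ')') count by
          simp [cbpGo, List.replicate_succ'],
        show cbpCheck ('('::rest) (n : Int) = cbpCheck rest (((n+1 : Nat) : Int)) by
          simp [cbpCheck],
        ih (n+1) count]
      cases h : cbpCheck rest (((n+1 : Nat) : Int)) with
      | none => rfl
      | some bal =>
        simp only
        by_cases hb : bal = 0 <;> simp [hb, List.count_cons]
    · by_cases hcl : ch = ')'
      · subst hcl
        cases n with
        | zero =>
          rw [show cbpGo (')'::rest) (List.replicate 0 ')') count = 0 by simp [cbpGo],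
            show cbpCheck (')'::rest) ((0 : Nat) : Int) = none by simp [cbpCheck]]
        | succ m =>
          rw [show cbpGo (')'::rest) (List.replicate (m+1) ')') count
                = cbpGo rest (List.replicate m ')') (count+1) by
              simp [cbpGo, List.dropLast_replicate],
            show cbpCheck (')'::rest) (((m+1 : Nat) : Int)) = cbpCheck rest ((m : Int)) by
              simp [cbpCheck]; intro hz; exact absurd hz (by omega),
            ih m (count+1)]
          cases h : cbpCheck rest ((m : Int)) with
          | none => rfl
          | some bal =>
            simp only
            by_cases hb : bal = 0 <;> simp [hb, List.count_cons] <;> push_cast <;> ring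
      · rw [show cbpGo (ch::rest) (List.replicate n ')') count
              = cbpGo rest (List.replicate n ')') count by simp [cbpGo, hop, hcl],
          show cbpCheck (ch::rest) ((n : Int)) = cbpCheck rest ((n : Int)) by
            simp [cbpCheck, hop, hcl],
          ih n count]
        cases h : cbpCheck rest ((n : Int)) with
        | none => rfl
        | some bal =>
          simp only
          by_cases hb : bal = 0 <;> simp [hb, List.count_cons, hcl]

-- In a run of the validator that falls through, opens minus closes equals the balance change.
theorem cbpCheck_balance (cs : List Char) : ∀ (bal b : Int),
    cbpCheck cs bal = some b → (cs.count '(' : Int) + bal = (cs.count ')' : Int) + b := by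
  induction cs with
  | nil => intro bal b h; simp [cbpCheck] at h; simp [h]
  | cons ch rest ih =>
    intro bal b h
    by_cases hop : ch = '('
    · subst hop
      simp only [cbpCheck, if_pos rfl] at h
      have := ih (bal + 1) b h
      simp [List.count_cons]
      omega
    · by_cases hcl : ch = ')'
      · subst hcl
        simp only [cbpCheck, if_neg hop, if_pos rfl] at h
        by_cases hz : bal = 0
        · simp [hz] at h
        · rw [if_neg hz] at h
          have := ih (bal - 1) b h
          simp [List.count_cons]
          omega
      · simp only [cbpCheck, if_neg hop, if_neg hcl] at h
        have := ih bal b h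
        simp [List.count_cons, hop, hcl]
        omega

-- The validator ignores non-bracket characters, so filtering to brackets preserves it.
theorem cbpCheck_filter (cs : List Char) : ∀ (bal : Int),
    cbpCheck (cs.filter (fun ch => ch == '(' || ch == ')')) bal = cbpCheck cs bal := by
  induction cs with
  | nil => intro bal; rfl
  | cons ch rest ih =>
    intro bal
    by_cases hop : ch = '('
    · subst hop; simp only [List.filter_cons, cbpCheck]; simp [cbpCheck, ih]
    · by_cases hcl : ch = ')'
      · subst hcl; simp only [List.filter_cons, cbpCheck]; simp [cbpCheck, ih]
      · simp only [List.filter_cons]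
        rw [if_neg (by simp [hop, hcl])]
        rw [ih bal]
        simp [cbpCheck, hop, hcl]

-- Deleting the "()" occurrences preserves the validator (for nonnegative balance).
theorem cbpCheck_cbpRep (l : List Char) : ∀ (bal : Int), 0 ≤ bal →
    cbpCheck (cbpRep l) bal = cbpCheck l bal := by
  fun_induction cbpRep l with
  | case1 => intro bal _; rfl
  | case2 c => intro bal _; rfl
  | case3 c1 c2 t hp ih =>
    intro bal hb
    obtain ⟨h1, h2⟩ := hp; subst h1; subst h2
    rw [show cbpCheck ('(' :: ')' :: t) bal = cbpCheck t bal by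
      simp [cbpCheck]; intro h; omega]
    exact ih bal hb
  | case4 c1 c2 t hp ih =>
    intro bal hb
    by_cases hop : c1 = '('
    · subst hop
      simp only [cbpCheck, if_pos rfl]
      exact ih (bal + 1) (by omega)
    · by_cases hcl : c1 = ')'
      · subst hcl
        simp only [cbpCheck, if_neg hop, if_pos rfl]
        by_cases hz : bal = 0
        · simp [hz]
        · rw [if_neg hz, if_neg hz]
          exact ih (bal - 1) (by omega)
      · simp only [cbpCheck, if_neg hop, if_neg hcl]
        exact ih bal hb

-- cbpRep keeps only characters of the original list.
theorem cbpRep_subset (l : List Char) : ∀ c, c ∈ cbpRep l → c ∈ l := by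
  fun_induction cbpRep l with
  | case1 => intro c h; simp at h
  | case2 d => intro c h; simpa using h
  | case3 c1 c2 t hp ih =>
    intro c h
    simp [ih c h]
  | case4 c1 c2 t hp ih =>
    intro c h
    rcases List.mem_cons.mp h with h | h
    · simp [h]
    · have := ih c h
      simp at this ⊢
      tauto

-- The fixpoint loop preserves the validator and the bracket-only invariant,
-- and its result contains no "()" substring.
theorem cbpFix_check (t : List Char) (bal : Int) (hb : 0 ≤ bal) :
    cbpCheck (cbpFix t) bal = cbpCheck t bal := by
  fun_induction cbpFix t with
  | case1 t h ih =>
    rw [ih, cbpReplace_eq, cbpCheck_cbpRep t bal hb]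
  | case2 t h => rfl

theorem cbpFix_subset (t : List Char) : ∀ c, c ∈ cbpFix t → c ∈ t := by
  fun_induction cbpFix t with
  | case1 t h ih =>
    intro c hc
    have h2 := ih c hc
    rw [cbpReplace_eq] at h2
    exact cbpRep_subset t c h2
  | case2 t h => intro c hc; exact hc

theorem cbpFix_no_pair (t : List Char) : ¬ (['(', ')'] <:+: cbpFix t) := by
  fun_induction cbpFix t with
  | case1 t h ih => exact ih
  | case2 t h =>
    intro hinf
    exact h ((PySem.Chars.isIn_iff_infix _ _).mpr hinf)

-- The validator on a pile of opening brackets adds its length to the balance.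
theorem cbpCheck_opens (b : Nat) :
    ∀ bal : Int, cbpCheck (List.replicate b '(') bal = some (bal + b) := by
  induction b with
  | zero => intro bal; simp [cbpCheck]
  | succ m ih =>
    intro bal
    rw [List.replicate_succ]
    simp only [cbpCheck]
    rw [ih (bal + 1)]
    have : (bal + 1) + (m : Int) = bal + ((m : Nat) + 1 : Nat) := by push_cast; ring
    rw [this]
    simp

-- A bracket-only list with no "()" substring is a pile of ')' then a pile of '('.
theorem no_pair_shape (l : List Char) (hbr : ∀ c ∈ l, c = '(' ∨ c = ')')
    (hnp : ¬ (['(', ')'] <:+: l)) :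
    ∃ a b, l = List.replicate a ')' ++ List.replicate b '(' := by
  induction l with
  | nil => exact ⟨0, 0, rfl⟩
  | cons c t ih =>
    have htbr : ∀ c' ∈ t, c' = '(' ∨ c' = ')' := fun c' h => hbr c' (by simp [h])
    have htnp : ¬ (['(', ')'] <:+: t) := fun h => hnp (h.trans (List.suffix_cons c t).isInfix)
    obtain ⟨a, b, hab⟩ := ih htbr htnp
    rcases hbr c (by simp) with hc | hc
    · subst hc
      cases a with
      | zero => exact ⟨0, b + 1, by simp [hab, List.replicate_succ]⟩
      | succ m =>
        exfalso
        apply hnp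
        rw [hab, List.replicate_succ]
        exact ⟨[], List.replicate m ')' ++ List.replicate b '(', by simp⟩
    · subst hc
      exact ⟨a + 1, b, by simp [hab, List.replicate_succ]⟩

-- On such a shape, the validator returns balance 0 from 0 only for the empty list.
theorem check_shape (a b : Nat)
    (h : cbpCheck (List.replicate a ')' ++ List.replicate b '(') 0 = some 0) :
    a = 0 ∧ b = 0 := by
  cases a with
  | zero =>
    simp only [List.replicate_zero, List.nil_append] at h
    rw [cbpCheck_opens b 0] at h
    simp at h
    exact ⟨rfl, by omega⟩
  | succ m =>
    rw [List.replicate_succ] at h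
    simp [cbpCheck] at h

-- Python's s.count("(") on the one-character pattern "(" is the character count.
theorem countGo_single (l : List Char) : ∀ (fuel acc : Nat), l.length ≤ fuel →
    PySem.Chars.count.go ['('] fuel l acc = acc + l.count '(' := by
  induction l with
  | nil => intro fuel acc _; cases fuel <;> simp [PySem.Chars.count.go]
  | cons h t ih =>
    intro fuel acc hf
    cases fuel with
    | zero => simp at hf
    | succ f =>
      have hf' : t.length ≤ f := by simpa using hf
      by_cases hh : h = '('
      · subst hh
        rw [show PySem.Chars.count.go ['('] (f+1) ('('::t) acc
              = PySem.Chars.count.go ['('] f t (acc+1) by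
            simp [PySem.Chars.count.go, List.isPrefixOf],
          ih f (acc+1) hf']
        simp [List.count_cons]
        omega
      · rw [show PySem.Chars.count.go ['('] (f+1) (h::t) acc
              = PySem.Chars.count.go ['('] f t acc by
            simp [PySem.Chars.count.go, List.isPrefixOf, Ne.symm hh],
          ih f acc hf']
        simp [List.count_cons, hh]

theorem chars_count_open (l : List Char) : PySem.Chars.count l ['('] = l.count '(' := by
  rw [PySem.Chars.count, if_neg (by simp)]
  exact (countGo_single l l.length 0 le_rfl).trans (by simp)

-- ===== VERDICT (by name: the statement is the Claim_ definition above) =====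
theorem count_bracket_pair_spec : Claim_equal_count_bracket_pair := by
  intro s _
  unfold Spec_count_bracket_pair count_bracket_pair count_bracket_pair_alt
  have hA := cbpGo_replicate s.toList 0 0
  simp only [List.replicate_zero, Nat.cast_zero] at hA
  rw [hA]
  have hfix : cbpCheck (cbpFix (s.toList.filter (fun ch => ch == '(' || ch == ')'))) 0
      = cbpCheck s.toList 0 := by
    rw [cbpFix_check _ 0 le_rfl, cbpCheck_filter]
  cases hc : cbpCheck s.toList 0 with
  | none =>
    rw [hc] at hfix
    have hne : cbpFix (s.toList.filter (fun ch => ch == '(' || ch == ')')) ≠ [] := by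
      intro h0
      rw [h0] at hfix
      simp [cbpCheck] at hfix
    simp only [List.isEmpty_iff]
    rw [if_neg hne]
  | some bal =>
    rw [hc] at hfix
    by_cases hb : bal = 0
    · subst hb
      obtain ⟨a, b, hab⟩ := no_pair_shape
        (cbpFix (s.toList.filter (fun ch => ch == '(' || ch == ')')))
        (by
          intro c hcm
          have hm := cbpFix_subset _ c hcm
          have := List.of_mem_filter hm
          simpa using this)
        (cbpFix_no_pair _)
      obtain ⟨ha, hbz⟩ := check_shape a b (by rw [← hab]; exact hfix)
      have h0 : cbpFix (s.toList.filter (fun ch => ch == '(' || ch == ')')) = [] := by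
        rw [hab, ha, hbz]; rfl
      have hbal := cbpCheck_balance s.toList 0 0 hc
      simp [h0, chars_count_open]
      omega
    · have hne : cbpFix (s.toList.filter (fun ch => ch == '(' || ch == ')')) ≠ [] := by
        intro h0
        rw [h0] at hfix
        simp [cbpCheck] at hfix
        exact hb hfix.symm
      simp only [List.isEmpty_iff]
      rw [if_neg hne, if_neg hb]
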